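-- pv_equiv track=rewrite | github.com/007vipintiwari/binary_search_for_interviews | bouquets.py | calculate
-- ===== SOURCE A (Python) =====
-- def calculate(bloomday, m, k, mid):
--     count = 0
--     bouquet = 0
--     for value in bloomday:
--         if value > mid:
--             count = 0
--         else:
--             count += 1
--             if count == k:
--                 bouquet += 1
--                 count = 0
--     return bouquet >= m
-- ===== SOURCE B (Python) =====
-- def calculate(bloomday, m, k, mid):
--     if k <= 0:
--         return m <= 0
--     total = 0
--     i = 0
--     n = len(bloomday)
--     while i < n:
--         if bloomday[i] > mid:
--             i += 1
--         else:
--             j = i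
--             while j < n and bloomday[j] <= mid:
--                 j += 1
--             total += (j - i) // k
--             i = j
--     return total >= m
-- ===== Notes on version B (the rewrite author's own statement) =====
-- stated objective: alternative
-- what changed: Replaces A's per-element counter-with-reset (emit a bouquet each time the counter reaches k) by a run decomposition: skip non-bloomable flowers, measure each maximal bloomable run in one inner scan, and add run // k per run (with a k <= 0 guard returning m <= 0, matching A which can never complete a bouquet then).
import Mathlib
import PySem

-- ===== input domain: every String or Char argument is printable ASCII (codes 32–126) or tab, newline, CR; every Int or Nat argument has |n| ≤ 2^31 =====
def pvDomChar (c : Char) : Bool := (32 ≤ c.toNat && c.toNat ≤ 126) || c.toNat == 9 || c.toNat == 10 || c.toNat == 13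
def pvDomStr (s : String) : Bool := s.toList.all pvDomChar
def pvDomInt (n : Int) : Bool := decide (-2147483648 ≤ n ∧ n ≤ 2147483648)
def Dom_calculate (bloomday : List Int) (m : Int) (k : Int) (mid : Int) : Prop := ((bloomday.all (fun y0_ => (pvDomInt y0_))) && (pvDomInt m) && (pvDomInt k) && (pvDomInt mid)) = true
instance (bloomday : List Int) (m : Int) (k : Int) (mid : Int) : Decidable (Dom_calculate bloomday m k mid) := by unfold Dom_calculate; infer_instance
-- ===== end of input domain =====

-- B replaces A's per-element counter-with-reset by a run decomposition (maximal bloomable runs, run // k each); alternative structure, same O(n) cost.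


-- ===== PORT A =====
-- A's loop: state (count, bouquet); reset count on a late flower, else bump it and emit a bouquet when it reaches k.
def calcStepA (k : Int) (mid : Int) (s : Int × Int) (value : Int) : Int × Int :=
  if value > mid then (0, s.2)
  else
    let count := s.1 + 1
    if count = k then (0, s.2 + 1) else (count, s.2)

def calculate (bloomday : List Int) (m : Int) (k : Int) (mid : Int) : Bool :=
  let st := bloomday.foldl (calcStepA k mid) (0, 0)
  decide (st.2 ≥ m)

-- ===== PORT B =====
-- B's outer loop over the remaining list: skip a late flower, else measure the maximal bloomable run
-- (the inner while loop = takeWhile) and add run // k, continuing after the run (dropWhile).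
def calcRuns (k : Int) (mid : Int) : List Int → Int
  | [] => 0
  | v :: xs =>
    if v > mid then calcRuns k mid xs
    else
      let run := ((v :: xs).takeWhile (fun x => decide (x ≤ mid))).length
      PySem.Int.floordiv (run : Int) k + calcRuns k mid ((v :: xs).dropWhile (fun x => decide (x ≤ mid)))
  termination_by xs => xs.length
  decreasing_by
    all_goals simp only [List.dropWhile, List.length_cons]
    · omega
    · have hv' : (decide (v ≤ mid)) = true := by simp_all
      rw [hv']
      exact Nat.lt_succ_of_le (List.length_dropWhile_le _ _)

def calculate_alt (bloomday : List Int) (m : Int) (k : Int) (mid : Int) : Bool :=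
  if k ≤ 0 then decide (m ≤ 0)
  else decide (calcRuns k mid bloomday ≥ m)

-- ===== PRECONDITION & SPEC =====
def Spec_calculate (bloomday : List Int) (m : Int) (k : Int) (mid : Int) (out : Bool) : Prop := out = calculate_alt bloomday m k mid
instance (bloomday : List Int) (m : Int) (k : Int) (mid : Int) (out : Bool) : Decidable (Spec_calculate bloomday m k mid out) := by unfold Spec_calculate; infer_instance

-- ===== CLAIM (what is proved, stated in full; the proofs are below) =====
def Claim_equal_calculate : Prop := ∀ (bloomday : List Int) (m : Int) (k : Int) (mid : Int), Dom_calculate bloomday m k mid → Spec_calculate bloomday m k mid (calculate bloomday m k mid)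

-- ===== LEMMAS AND PROOFS =====

-- Bouquets A produces from the rest of the list given the current consecutive count c (proof helper).
def calcT (k : Int) (mid : Int) (c : Int) : List Int → Int
  | [] => 0
  | v :: t =>
    if v > mid then calcT k mid 0 t
    else if c + 1 = k then 1 + calcT k mid 0 t else calcT k mid (c + 1) t

theorem foldA_snd (k mid : Int) (xs : List Int) : ∀ (c b : Int),
    (xs.foldl (calcStepA k mid) (c, b)).2 = b + calcT k mid c xs := by
  induction xs with
  | nil => intro c b; simp [calcT]
  | cons v t ih =>
    intro c b
    simp only [List.foldl_cons, calcStepA, calcT]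
    split_ifs with h1 h2
    · exact ih 0 b
    · rw [ih 0 (b + 1)]; ring
    · exact ih (c + 1) b

theorem calcT_nonpos (k mid : Int) (hk : k ≤ 0) (xs : List Int) : ∀ c, 0 ≤ c → calcT k mid c xs = 0 := by
  induction xs with
  | nil => intro c _; simp [calcT]
  | cons v t ih =>
    intro c hc
    simp only [calcT]
    split_ifs with h1 h2
    · exact ih 0 le_rfl
    · omega
    · exact ih (c + 1) (by omega)

-- Unfolding of calcRuns through takeWhile/dropWhile, valid for every list shape.
theorem calcRuns_eq_span (k mid : Int) (xs : List Int) :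
    calcRuns k mid xs =
      PySem.Int.floordiv ((xs.takeWhile (fun x => decide (x ≤ mid))).length : Int) k
        + calcRuns k mid (xs.dropWhile (fun x => decide (x ≤ mid))) := by
  cases xs with
  | nil => simp [calcRuns, PySem.Int.floordiv]
  | cons v t =>
    by_cases hv : v > mid
    · have hd : (decide (v ≤ mid)) = false := by simp; omega
      rw [calcRuns]
      simp [hd, hv, List.takeWhile, List.dropWhile, PySem.Int.floordiv, calcRuns]
    · rw [calcRuns]
      simp [hv]

theorem calcT_eq_run (k mid : Int) (hk : 0 < k) (xs : List Int) : ∀ c, 0 ≤ c → c < k →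
    calcT k mid c xs =
      (c + ((xs.takeWhile (fun x => decide (x ≤ mid))).length : Int)) / k
        + calcRuns k mid (xs.dropWhile (fun x => decide (x ≤ mid))) := by
  induction xs with
  | nil =>
    intro c hc1 hc2
    simp [calcT, calcRuns, Int.ediv_eq_zero_of_lt hc1 (by omega)]
  | cons v t ih =>
    intro c hc1 hc2
    by_cases hv : v > mid
    · have hd : (decide (v ≤ mid)) = false := by simp; omega
      simp only [calcT, if_pos hv, List.takeWhile, List.dropWhile, hd]
      rw [ih 0 le_rfl hk]
      have : calcRuns k mid (v :: t) =
          (0 + ((t.takeWhile (fun x => decide (x ≤ mid))).length : Int)) / k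
            + calcRuns k mid (t.dropWhile (fun x => decide (x ≤ mid))) := by
        rw [calcRuns]
        simp only [if_pos hv]
        rw [calcRuns_eq_span k mid t, PySem.Int.floordiv_eq_ediv_of_pos hk]
        ring_nf
      rw [this]
      simp only [List.length_nil, Nat.cast_zero, add_zero]
      rw [Int.ediv_eq_zero_of_lt hc1 hc2]
      ring_nf
    · have hd : (decide (v ≤ mid)) = true := by simp; omega
      simp only [calcT, if_neg hv, List.takeWhile, List.dropWhile, hd]
      by_cases hck : c + 1 = k
      · rw [if_pos hck, ih 0 le_rfl hk]
        simp only [List.length_cons]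
        push_cast
        have : c + (((t.takeWhile (fun x => decide (x ≤ mid))).length : Int) + 1) =
            ((t.takeWhile (fun x => decide (x ≤ mid))).length : Int) + 1 * k := by omega
        rw [this, Int.add_mul_ediv_right _ _ (by omega)]
        ring_nf
      · rw [if_neg hck, ih (c + 1) (by omega) (by omega)]
        simp only [List.length_cons]
        push_cast
        ring_nf

-- ===== VERDICT (by name: the statement is the Claim_ definition above) =====
theorem calculate_eq (bloomday : List Int) (m k mid : Int) :
    calculate bloomday m k mid = decide ((bloomday.foldl (calcStepA k mid) (0, 0)).2 ≥ m) := rfl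

theorem calculate_spec : Claim_equal_calculate := by
  intro bloomday m k mid _
  unfold Spec_calculate calculate_alt
  rw [calculate_eq, foldA_snd]
  by_cases hk : k ≤ 0
  · rw [calcT_nonpos k mid hk bloomday 0 le_rfl, if_pos hk]
    simp [ge_iff_le]
  · rw [if_neg hk]
    have hk' : 0 < k := by omega
    rw [calcT_eq_run k mid hk' bloomday 0 le_rfl hk', calcRuns_eq_span k mid bloomday,
      PySem.Int.floordiv_eq_ediv_of_pos hk']
    simp
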